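-- pv_equiv track=rewrite | github.com/AlexP210/NSERC_Project | DataProcessing/UnusedScripts/BiologicalAssemblies.py | parseOperationExpression
-- ===== SOURCE A (Python) =====
-- def parseOperationExpression(expression) :
--     operations = []
--     stops = [ "," , "-" , ")" ]
--
--     currentOp = ""
--     i = 1
--
--     # Iterate over the operation expression
--     while i in range(1, len(expression) - 1):
--         pos = i
--
--         # Read an operation
--         while expression[pos] not in stops and pos < len(expression) - 1 :
--             pos += 1
--         currentOp = expression[i : pos]
--
--         # Handle single operations
--         if expression[pos] != "-" :
--             operations.append(currentOp)
--             i = pos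
--
--         # Handle ranges
--         if expression[pos] == "-" :
--             pos += 1
--             i = pos
--
--             # Read in the range's end value
--             while expression[pos] not in stops :
--                 pos += 1
--             end = int(expression[i : pos])
--
--             # Add all the operations in [currentOp, end]
--             for val in range((int(currentOp)), end + 1) :
--                 operations.append(str(val))
--             i = pos
--         i += 1
--     return operations
-- ===== SOURCE B (Python) =====
-- def parseOperationExpression(expression):
--     inner = expression[1:-1]
--     if inner == "":
--         return []
--     operations = []
--     for token in inner.split(","):
--         if "-" in token:
--             left, right = token.split("-")
--             for v in range(int(left), int(right) + 1):
--                 operations.append(str(v))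
--         else:
--             operations.append(token)
--     return operations
-- ===== Notes on version B (the rewrite author's own statement) =====
-- stated objective: idiomatic
-- what changed: A's single manual pos/i forward index scan with stop characters is replaced by strip the brackets (expression[1:-1]), split the interior on ',', and expand each 'a-b' token with range(int(a), int(b)+1); the index bookkeeping disappears.
-- outside the precondition, e.g. on parseOperationExpression('(1)2)'): A returns ['1', '2'], B returns ['1)2']; on parseOperationExpression('(1,)'): A returns ['1'], B returns ['1', '']; on parseOperationExpression('(1-2-3)'): A returns ['1', '2', '3'], B raises ValueError
import Mathlib
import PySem

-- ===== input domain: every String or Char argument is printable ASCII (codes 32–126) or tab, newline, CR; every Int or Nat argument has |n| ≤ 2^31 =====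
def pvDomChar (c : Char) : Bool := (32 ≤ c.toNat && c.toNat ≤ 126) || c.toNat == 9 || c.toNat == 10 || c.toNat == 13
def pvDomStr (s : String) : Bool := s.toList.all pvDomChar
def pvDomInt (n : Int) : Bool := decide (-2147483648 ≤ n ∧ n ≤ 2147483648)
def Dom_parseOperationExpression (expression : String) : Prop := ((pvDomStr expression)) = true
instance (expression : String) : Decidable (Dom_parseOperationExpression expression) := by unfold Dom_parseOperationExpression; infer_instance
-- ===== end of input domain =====

-- B replaces A's manual pos/i index scan by strip-brackets / split-on-',' / expand-each-token (idiomatic decomposition, same cost).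

-- ===== PORT A =====
-- stops = [",", "-", ")"]
def pvStops : List Char := [',', '-', ')']

-- inner scan `while expression[pos] not in stops and pos < len(expression) - 1: pos += 1`
-- (expression[pos] is always in range here: pos starts < len-1 and the bound keeps pos ≤ len-1,
--  so List.getD is exact for Python's indexing)
def pvScan1 (cs : List Char) (pos : Nat) : Nat :=
  if h : cs.getD pos ' ' ∉ pvStops ∧ pos < cs.length - 1 then
    pvScan1 cs (pos + 1)
  else pos
termination_by cs.length - pos
decreasing_by have := h.2; omega

-- inner scan `while expression[pos] not in stops: pos += 1`; none = Python's IndexError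
def pvScan2 (cs : List Char) (pos : Nat) : Option Nat :=
  if h : pos < cs.length then                      -- cs[pos]? = some _ iff pos < len; none = IndexError
    (if cs.getD pos ' ' ∈ pvStops then some pos else pvScan2 cs (pos + 1))
  else none
termination_by cs.length - pos

theorem pvScan1_ge (cs : List Char) (pos : Nat) : pos ≤ pvScan1 cs pos := by
  fun_induction pvScan1 cs pos with
  | case1 pos h ih => omega
  | case2 pos h => omega

theorem pvScan2_ge (cs : List Char) (pos q : Nat) (h : pvScan2 cs pos = some q) : pos ≤ q := by
  fun_induction pvScan2 cs pos generalizing q with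
  | case1 pos h1 h2 => simp_all
  | case2 pos h1 h2 ih => have := ih q h; omega
  | case3 pos h1 => simp_all

-- the while loop over i (Python's two mutually exclusive `if`s become if/else, `-` branch first);
-- the bare `ops` returns are Python's IndexError / ValueError exits (excluded by Pre_)
def pvLoopA (cs : List Char) (i : Nat) (ops : List (List Char)) : List (List Char) :=
  if hg : 1 ≤ i ∧ i < cs.length - 1 then
    let pos := pvScan1 cs i
    let currentOp := (cs.take pos).drop i              -- expression[i:pos] (0 ≤ i ≤ pos)
    if cs.getD pos ' ' = '-' then
      if h2 : (pvScan2 cs (pos + 1)).isSome then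
        let pos2 := (pvScan2 cs (pos + 1)).get h2
        if h3 : (PySem.Int.ofChars? ((cs.take pos2).drop (pos + 1))).isSome ∧
                (PySem.Int.ofChars? currentOp).isSome then
          let e := (PySem.Int.ofChars? ((cs.take pos2).drop (pos + 1))).get h3.1  -- end = int(...)
          let s := (PySem.Int.ofChars? currentOp).get h3.2                        -- int(currentOp)
          pvLoopA cs (pos2 + 1)
            (ops ++ (PySem.List.pyRange s (e + 1) 1).map (fun v => (PySem.Int.toStr v).toList))
        else ops                                       -- ValueError from int()
      else ops                                         -- IndexError
    else
      pvLoopA cs (pos + 1) (ops ++ [currentOp])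
  else ops
termination_by cs.length - i
decreasing_by
  · have h1 := pvScan1_ge cs i
    have h0 := hg.2
    have h4 := pvScan2_ge cs (pvScan1 cs i + 1) _ (Option.some_get h2).symm
    have h5 : (pvScan2 cs (pvScan1 cs i + 1)).get h2 = (pvScan2 cs (pos + 1)).get h2 := rfl
    omega
  · have h1 := pvScan1_ge cs i
    have h0 := hg.2
    omega

def parseOperationExpression (expression : String) : List String :=
  (pvLoopA expression.toList 1 []).map String.ofList

-- ===== PORT B =====
-- per-token body of B's for-loop
def pvExpandB (ops : List (List Char)) (token : List Char) : List (List Char) :=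
  if PySem.Chars.isIn ['-'] token then
    match token.splitOn '-' with                    -- left, right = token.split('-')
    | [left, right] =>
      match PySem.Int.ofChars? left, PySem.Int.ofChars? right with
      | some s, some e =>
          ops ++ (PySem.List.pyRange s (e + 1) 1).map (fun v => (PySem.Int.toStr v).toList)
      | _, _ => ops                                 -- int() ValueError (outside Pre_)
    | _ => ops                                      -- unpacking ValueError (outside Pre_)
  else ops ++ [token]

def parseOperationExpression_alt (expression : String) : List String :=
  let inner := PySem.List.slice expression.toList (some 1) (some (-1))   -- expression[1:-1]
  if inner = [] then []
  else ((inner.splitOn ',').foldl pvExpandB []).map String.ofList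

-- ===== PRECONDITION & SPEC =====
-- Pre_ excludes malformed expressions on which A raises (a range token that is not int-int, or a
-- range ending where the string ends without a terminator) and the inputs where A's manual scan
-- treats text B cannot see the same way: an interior ')' (A splits on it like ','), and an interior
-- ending in ',' (A drops the trailing empty token that split keeps).
def Pre_parseOperationExpression (expression : String) : Prop :=
  let cs := expression.toList
  let inner := (cs.drop 1).dropLast                 -- the characters expression[1:-1]
  let toks := inner.splitOn ','
  ')' ∉ inner ∧
  inner.getLast? ≠ some ',' ∧
  (∀ tok ∈ toks, '-' ∈ tok →
      ('-' ∉ ((tok.dropWhile (· ≠ '-')).drop 1) ∧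
       PySem.Int.ofChars? (tok.takeWhile (· ≠ '-')) ≠ none ∧
       PySem.Int.ofChars? ((tok.dropWhile (· ≠ '-')).drop 1) ≠ none)) ∧
  (cs.getLast? = some '-' → inner ≠ [] → '-' ∈ toks.getLastD []) ∧
  ('-' ∈ toks.getLastD [] → ∃ t, cs.getLast? = some t ∧ t ∈ pvStops)

instance (expression : String) : Decidable (Pre_parseOperationExpression expression) := by
  unfold Pre_parseOperationExpression; infer_instance

def pvWitness_parseOperationExpression : String := "(1,3-5,a)"

def Spec_parseOperationExpression (expression : String) (out : List String) : Prop :=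
  out = parseOperationExpression_alt expression
instance (expression : String) (out : List String) : Decidable (Spec_parseOperationExpression expression out) := by
  unfold Spec_parseOperationExpression; infer_instance

-- ===== CLAIM (what is proved, stated in full; the proofs are below) =====
def Claim_equal_parseOperationExpression : Prop := ∀ (expression : String), Dom_parseOperationExpression expression → Pre_parseOperationExpression expression → Spec_parseOperationExpression expression (parseOperationExpression expression)

-- ===== LEMMAS AND PROOFS =====

theorem pv_slice_1_neg1 (cs : List Char) :
    PySem.List.slice cs (some 1) (some (-1)) = (cs.drop 1).dropLast := by
  simp [PySem.List.slice]
  cases cs with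
  | nil => simp
  | cons c cs => simp [List.dropLast_eq_take]

theorem pv_isIn_singleton (a : Char) (l : List Char) :
    PySem.Chars.isIn [a] l = true ↔ a ∈ l := by
  rw [PySem.Chars.isIn_iff_infix]
  constructor
  · intro h; exact h.subset (by simp)
  · intro h
    obtain ⟨s, t, rfl⟩ := List.append_of_mem h
    exact ⟨s, t, by simp⟩

theorem pv_mem_splitOn_not_mem (c : Char) (xs tok : List Char) (h : tok ∈ xs.splitOn c) : c ∉ tok := by
  induction xs generalizing tok with
  | nil => simp only [List.splitOn_nil, List.mem_singleton] at h; simp [h]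
  | cons x xs ih =>
    simp only [List.splitOn, List.splitOnP_cons] at h ih
    by_cases hx : x = c
    · rw [if_pos (by simp [hx])] at h
      rcases List.mem_cons.mp h with h' | h'
      · simp [h']
      · exact ih tok h'
    · rw [if_neg (by simp [hx])] at h
      obtain ⟨hd, tl, heq⟩ := List.exists_cons_of_ne_nil (List.splitOnP_ne_nil (· == c) xs)
      rw [heq, List.modifyHead_cons] at h
      rcases List.mem_cons.mp h with h' | h'
      · subst h'
        intro hmem
        rcases List.mem_cons.mp hmem with h'' | h''
        · exact hx h''.symm
        · exact ih hd (by rw [heq]; exact List.mem_cons_self) h''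
      · exact ih tok (by rw [heq]; exact List.mem_cons_of_mem _ h')

theorem pv_getLast_splitOn_ne_nil (c : Char) (xs : List Char) (hx : xs ≠ [])
    (hlast : xs.getLast? ≠ some c) : (xs.splitOn c).getLastD [] ≠ [] := by
  induction xs with
  | nil => exact absurd rfl hx
  | cons x xs ih =>
    by_cases hxs : xs = []
    · subst hxs
      have hxc : x ≠ c := by simpa using hlast
      simp [List.splitOn, List.splitOnP_cons, hxc]
    · have hlast' : xs.getLast? ≠ some c := by
        obtain ⟨y, ys, rfl⟩ := List.exists_cons_of_ne_nil hxs
        rwa [List.getLast?_cons_cons] at hlast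
      have ihh := ih hxs hlast'
      obtain ⟨hd, tl, heq⟩ := List.exists_cons_of_ne_nil (List.splitOnP_ne_nil (· == c) xs)
      simp only [List.splitOn] at ihh heq ⊢
      rw [List.splitOnP_cons]
      by_cases hxc : x = c
      · rw [if_pos (by simp [hxc]), heq]
        rw [heq] at ihh
        simpa using ihh
      · rw [if_neg (by simp [hxc]), heq, List.modifyHead_cons]
        rw [heq] at ihh
        cases tl with
        | nil => simp
        | cons a tl => simpa using ihh

theorem pv_getD_junction (p z : List Char) (x d : Char) : (p ++ x :: z).getD p.length d = x := by
  simp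

theorem pv_scan1_mid (p u v : List Char) (c : Char) (hu : ∀ x ∈ u, x ∉ pvStops)
    (hc : c ∈ pvStops) : pvScan1 (p ++ u ++ c :: v) p.length = p.length + u.length := by
  induction u generalizing p with
  | nil =>
    rw [pvScan1]
    simp only [List.nil_append, List.append_nil, List.length_nil, Nat.add_zero]
    rw [dif_neg]
    intro h
    exact absurd hc (by simpa [pv_getD_junction] using h.1)
  | cons x u ih =>
    rw [pvScan1, dif_pos]
    · have h1 : p ++ (x :: u) ++ c :: v = (p ++ [x]) ++ u ++ c :: v := by simp
      have h2 : p.length + 1 = (p ++ [x]).length := by simp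
      rw [h1, h2, ih (p ++ [x]) (fun y hy => hu y (by simp [hy]))]
      simp only [List.length_append, List.length_cons, List.length_nil, Option.some.injEq]; omega
    · constructor
      · have : (p ++ (x :: u) ++ c :: v).getD p.length ' ' = x := by
          simpa using pv_getD_junction p (u ++ c :: v) x ' '
        rw [this]; exact hu x (by simp)
      · simp only [List.length_append, List.length_cons, List.length_nil, Option.some.injEq]; omega

theorem pv_scan1_end (p u : List Char) (t : Char) (hu : ∀ x ∈ u, x ∉ pvStops) :
    pvScan1 (p ++ u ++ [t]) p.length = p.length + u.length := by
  induction u generalizing p with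
  | nil =>
    rw [pvScan1]
    simp only [List.nil_append, List.append_nil, List.length_nil, Nat.add_zero]
    rw [dif_neg]
    intro h
    have := h.2
    simp at this
  | cons x u ih =>
    rw [pvScan1, dif_pos]
    · have h1 : p ++ (x :: u) ++ [t] = (p ++ [x]) ++ u ++ [t] := by simp
      have h2 : p.length + 1 = (p ++ [x]).length := by simp
      rw [h1, h2, ih (p ++ [x]) (fun y hy => hu y (by simp [hy]))]
      simp only [List.length_append, List.length_cons, List.length_nil, Option.some.injEq]; omega
    · constructor
      · have : (p ++ (x :: u) ++ [t]).getD p.length ' ' = x := by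
          simpa using pv_getD_junction p (u ++ [t]) x ' '
        rw [this]; exact hu x (by simp)
      · simp only [List.length_append, List.length_cons, List.length_nil, Option.some.injEq]; omega

theorem pv_scan2_mid (p u v : List Char) (c : Char) (hu : ∀ x ∈ u, x ∉ pvStops)
    (hc : c ∈ pvStops) : pvScan2 (p ++ u ++ c :: v) p.length = some (p.length + u.length) := by
  induction u generalizing p with
  | nil =>
    rw [pvScan2]
    simp only [List.nil_append, List.append_nil, List.length_nil, Nat.add_zero]
    rw [dif_pos (by simp only [List.length_append, List.length_cons, List.length_nil, Option.some.injEq]; omega)]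
    rw [if_pos (by simpa [pv_getD_junction] using hc)]
  | cons x u ih =>
    rw [pvScan2, dif_pos (by simp only [List.length_append, List.length_cons, List.length_nil, Option.some.injEq]; omega)]
    rw [if_neg]
    · have h1 : p ++ (x :: u) ++ c :: v = (p ++ [x]) ++ u ++ c :: v := by simp
      have h2 : p.length + 1 = (p ++ [x]).length := by simp
      rw [h1, h2, ih (p ++ [x]) (fun y hy => hu y (by simp [hy]))]
      simp only [List.length_append, List.length_cons, List.length_nil, Option.some.injEq]; omega
    · have : (p ++ (x :: u) ++ c :: v).getD p.length ' ' = x := by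
        simpa using pv_getD_junction p (u ++ c :: v) x ' '
      rw [this]; exact hu x (by simp)

theorem pv_slice_mid (p u v : List Char) :
    (((p ++ u ++ v)).take (p.length + u.length)).drop p.length = u := by
  have : p ++ u ++ v = (p ++ u) ++ v := by simp
  rw [this, List.take_left' (by simp), List.drop_left]

-- token well-formedness carried through the induction
def pvGoodTok (tok : List Char) : Prop :=
  ',' ∉ tok ∧ ')' ∉ tok ∧
  ('-' ∈ tok →
    ('-' ∉ ((tok.dropWhile (· ≠ '-')).drop 1) ∧
     PySem.Int.ofChars? (tok.takeWhile (· ≠ '-')) ≠ none ∧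
     PySem.Int.ofChars? ((tok.dropWhile (· ≠ '-')).drop 1) ≠ none))

theorem pv_intercalate_singleton (x : List Char) : List.intercalate [','] [x] = x := by
  simp [List.intercalate]

theorem pv_intercalate_cons (x : List Char) (r : List (List Char)) (h : r ≠ []) :
    List.intercalate [','] (x :: r) = x ++ ',' :: List.intercalate [','] r := by
  obtain ⟨y, ys, rfl⟩ := List.exists_cons_of_ne_nil h
  simp [List.intercalate]

theorem pv_tok_decomp (tok : List Char) (h : '-' ∈ tok) :
    tok = tok.takeWhile (· ≠ '-') ++ '-' :: (tok.dropWhile (· ≠ '-')).drop 1 := by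
  have hne : tok.dropWhile (· ≠ '-') ≠ [] := by
    simp only [ne_eq, List.dropWhile_eq_nil_iff]
    push_neg
    exact ⟨'-', h, by simp⟩
  have hh := List.head_dropWhile_not (p := (· ≠ '-')) (l := tok) hne
  conv_lhs => rw [← List.takeWhile_append_dropWhile (p := (· ≠ '-')) (l := tok)]
  congr 1
  rw [← List.cons_head_tail hne]
  simp only [List.drop_succ_cons, List.drop_zero]
  congr 1
  simpa using hh

theorem pv_splitOn_pair (c : Char) (l r : List Char) (hl : c ∉ l) (hr : c ∉ r) :
    (l ++ c :: r).splitOn c = [l, r] := by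
  simp only [List.splitOn]
  rw [List.splitOnP_first _ l (by intro x hx; simp; rintro rfl; exact hl hx) c (by simp)]
  rw [List.splitOnP_eq_single _ _ (by intro x hx; simp; rintro rfl; exact hr hx)]

theorem pv_getLastD_cons (tok : List Char) (rest : List (List Char)) (h : rest ≠ []) :
    (tok :: rest).getLastD [] = rest.getLastD [] := by
  obtain ⟨b, rs, rfl⟩ := List.exists_cons_of_ne_nil h
  simp [List.getLastD]

theorem pv_scan1_mid' (cs p u v : List Char) (c : Char) (i res : Nat)
    (hcs : cs = p ++ u ++ c :: v) (hi : i = p.length) (hres : res = p.length + u.length)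
    (hu : ∀ x ∈ u, x ∉ pvStops) (hc : c ∈ pvStops) : pvScan1 cs i = res := by
  subst hcs hi hres; exact pv_scan1_mid p u v c hu hc

theorem pv_scan1_end' (cs p u : List Char) (t : Char) (i res : Nat)
    (hcs : cs = p ++ u ++ [t]) (hi : i = p.length) (hres : res = p.length + u.length)
    (hu : ∀ x ∈ u, x ∉ pvStops) : pvScan1 cs i = res := by
  subst hcs hi hres; exact pv_scan1_end p u t hu

theorem pv_scan2_mid' (cs p u v : List Char) (c : Char) (i res : Nat)
    (hcs : cs = p ++ u ++ c :: v) (hi : i = p.length) (hres : res = p.length + u.length)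
    (hu : ∀ x ∈ u, x ∉ pvStops) (hc : c ∈ pvStops) : pvScan2 cs i = some res := by
  subst hcs hi hres; exact pv_scan2_mid p u v c hu hc

theorem pv_getD' (cs p z : List Char) (x d : Char) (i : Nat)
    (hcs : cs = p ++ x :: z) (hi : i = p.length) : cs.getD i d = x := by
  subst hcs hi; exact pv_getD_junction p z x d

theorem pv_slice_any (cs p u v : List Char) (i k : Nat)
    (hcs : cs = p ++ u ++ v) (hi : i = p.length) (hk : k = p.length + u.length) :
    (cs.take k).drop i = u := by
  subst hcs hi hk; exact pv_slice_mid p u v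

theorem pv_main (toks : List (List Char)) (p : List Char) (t : Char) (ops : List (List Char))
    (hp : 1 ≤ p.length) (hne : toks ≠ []) (hgood : ∀ tok ∈ toks, pvGoodTok tok)
    (hlastne : toks.getLastD [] ≠ [])
    (ht1 : t = '-' → '-' ∈ toks.getLastD [])
    (ht2 : '-' ∈ toks.getLastD [] → t ∈ pvStops) :
    pvLoopA (p ++ List.intercalate [','] toks ++ [t]) p.length ops = toks.foldl pvExpandB ops := by
  induction toks generalizing p ops with
  | nil => exact absurd rfl hne
  | cons tok rest ih =>
    obtain ⟨hGc, hGp, hGr⟩ := hgood tok List.mem_cons_self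
    simp only [List.foldl_cons]
    by_cases hrest : rest = []
    · -- tok is the last token
      subst hrest
      simp only [List.getLastD] at hlastne ht1 ht2
      rw [pv_intercalate_singleton]
      by_cases hdash : '-' ∈ tok
      · -- last token, a range token
        obtain ⟨hrnm, hofl, hofr⟩ := hGr hdash
        have hdec := pv_tok_decomp tok hdash
        set l := tok.takeWhile (· ≠ '-') with hldef
        set r := (tok.dropWhile (· ≠ '-')).drop 1 with hrdef
        have hlnm : '-' ∉ l := fun hm => by simpa using List.mem_takeWhile_imp hm
        have hlstops : ∀ x ∈ l, x ∉ pvStops := by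
          intro x hx
          have hxtok : x ∈ tok := by rw [hdec]; exact List.mem_append_left _ hx
          simp only [pvStops, List.mem_cons, List.mem_singleton, not_or]
          exact ⟨fun e => hGc (e ▸ hxtok), fun e => hlnm (e ▸ hx), fun e => hGp (e ▸ hxtok), by simp⟩
        have hrstops : ∀ x ∈ r, x ∉ pvStops := by
          intro x hx
          have hxtok : x ∈ tok := by rw [hdec]; exact List.mem_append_right _ (by simp [hx])
          simp only [pvStops, List.mem_cons, List.mem_singleton, not_or]
          exact ⟨fun e => hGc (e ▸ hxtok), fun e => hrnm (e ▸ hx), fun e => hGp (e ▸ hxtok), by simp⟩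
        have htst : t ∈ pvStops := ht2 hdash
        obtain ⟨es, hes⟩ := Option.ne_none_iff_exists'.mp hofr
        obtain ⟨ss, hss⟩ := Option.ne_none_iff_exists'.mp hofl
        have e1 : p ++ tok ++ [t] = p ++ l ++ '-' :: (r ++ [t]) := by rw [hdec]; simp
        have hLtok : tok.length = l.length + 1 + r.length := by rw [hdec]; simp; omega
        rw [e1, pvLoopA,
          dif_pos ⟨hp, by simp only [List.length_append, List.length_cons, List.length_nil]; omega⟩]
        have hscan1 : pvScan1 (p ++ l ++ '-' :: (r ++ [t])) p.length = p.length + l.length :=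
          pv_scan1_mid' _ p l (r ++ [t]) '-' _ _ rfl rfl rfl hlstops (by simp [pvStops])
        simp only [hscan1]
        rw [pv_getD' _ (p ++ l) (r ++ [t]) '-' ' ' _ (by simp) (by simp), if_pos rfl]
        have hscan2 : pvScan2 (p ++ l ++ '-' :: (r ++ [t])) (p.length + l.length + 1) =
            some (p.length + l.length + 1 + r.length) :=
          pv_scan2_mid' _ (p ++ l ++ ['-']) r [] t _ _ (by simp)
            (by simp only [List.length_append, List.length_cons, List.length_nil] <;> omega)
            (by simp only [List.length_append, List.length_cons, List.length_nil] <;> omega)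
            hrstops htst
        rw [dif_pos (by rw [hscan2]; rfl)]
        simp only [hscan2, Option.get_some]
        have hslice2 : (((p ++ l ++ '-' :: (r ++ [t])).take (p.length + l.length + 1 + r.length)).drop (p.length + l.length + 1)) = r :=
          pv_slice_any _ (p ++ l ++ ['-']) r [t] _ _ (by simp)
            (by simp only [List.length_append, List.length_cons, List.length_nil] <;> omega)
            (by simp only [List.length_append, List.length_cons, List.length_nil] <;> omega)
        have hslice1 : (((p ++ l ++ '-' :: (r ++ [t])).take (p.length + l.length)).drop p.length) = l :=
          pv_slice_any _ p l ('-' :: (r ++ [t])) _ _ rfl rfl rfl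
        simp only [hslice1, hslice2, hes, hss]
        rw [dif_pos ⟨rfl, rfl⟩]
        simp only [Option.get_some]
        rw [pvLoopA,
          dif_neg (by simp only [List.length_append, List.length_cons, List.length_nil, not_and]; omega)]
        rw [pvExpandB, if_pos ((pv_isIn_singleton '-' tok).mpr hdash)]
        have hsp : tok.splitOn '-' = [l, r] := by
          conv_lhs => rw [hdec]
          exact pv_splitOn_pair '-' l r hlnm hrnm
        rw [hsp]
        simp only [hss, hes]
        rfl
      · -- last token, a plain token
        have htne : t ≠ '-' := fun e => hdash (by simpa using ht1 e)
        have hstops : ∀ x ∈ tok, x ∉ pvStops := by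
          intro x hx
          simp only [pvStops, List.mem_cons, List.mem_singleton, not_or]
          exact ⟨fun e => hGc (e ▸ hx), fun e => hdash (e ▸ hx), fun e => hGp (e ▸ hx), by simp⟩
        have htokne : 1 ≤ tok.length := by
          cases tok with
          | nil => exact absurd rfl hlastne
          | cons a l => simp
        rw [pvLoopA,
          dif_pos ⟨hp, by simp only [List.length_append, List.length_cons, List.length_nil]; omega⟩]
        have hscan1 : pvScan1 (p ++ tok ++ [t]) p.length = p.length + tok.length :=
          pv_scan1_end' _ p tok t _ _ rfl rfl rfl hstops
        simp only [hscan1]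
        rw [pv_getD' _ (p ++ tok) [] t ' ' _ (by simp) (by simp), if_neg htne]
        have hslice1 : (((p ++ tok ++ [t]).take (p.length + tok.length)).drop p.length) = tok :=
          pv_slice_any _ p tok [t] _ _ rfl rfl rfl
        rw [hslice1, pvLoopA,
          dif_neg (by simp only [List.length_append, List.length_cons, List.length_nil, not_and]; omega)]
        rw [pvExpandB,
          if_neg (by simp only [Bool.not_eq_true]; exact Bool.eq_false_iff.mpr (fun h => hdash ((pv_isIn_singleton '-' tok).mp h)))]
        simp
    · -- tok is followed by more tokens
      rw [pv_getLastD_cons tok rest hrest] at hlastne ht1 ht2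
      rw [pv_intercalate_cons tok rest hrest]
      have hIH := fun (p' : List Char) ops' hp' => ih p' ops' hp' hrest
        (fun tk hk => hgood tk (List.mem_cons_of_mem _ hk)) hlastne ht1 ht2
      by_cases hdash : '-' ∈ tok
      · -- a range token, more tokens follow
        obtain ⟨hrnm, hofl, hofr⟩ := hGr hdash
        have hdec := pv_tok_decomp tok hdash
        set l := tok.takeWhile (· ≠ '-') with hldef
        set r := (tok.dropWhile (· ≠ '-')).drop 1 with hrdef
        have hlnm : '-' ∉ l := fun hm => by simpa using List.mem_takeWhile_imp hm
        have hlstops : ∀ x ∈ l, x ∉ pvStops := by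
          intro x hx
          have hxtok : x ∈ tok := by rw [hdec]; exact List.mem_append_left _ hx
          simp only [pvStops, List.mem_cons, List.mem_singleton, not_or]
          exact ⟨fun e => hGc (e ▸ hxtok), fun e => hlnm (e ▸ hx), fun e => hGp (e ▸ hxtok), by simp⟩
        have hrstops : ∀ x ∈ r, x ∉ pvStops := by
          intro x hx
          have hxtok : x ∈ tok := by rw [hdec]; exact List.mem_append_right _ (by simp [hx])
          simp only [pvStops, List.mem_cons, List.mem_singleton, not_or]
          exact ⟨fun e => hGc (e ▸ hxtok), fun e => hrnm (e ▸ hx), fun e => hGp (e ▸ hxtok), by simp⟩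
        obtain ⟨es, hes⟩ := Option.ne_none_iff_exists'.mp hofr
        obtain ⟨ss, hss⟩ := Option.ne_none_iff_exists'.mp hofl
        have e1 : p ++ (tok ++ ',' :: List.intercalate [','] rest) ++ [t] =
            p ++ l ++ '-' :: (r ++ ',' :: (List.intercalate [','] rest ++ [t])) := by
          rw [hdec]; simp
        rw [e1, pvLoopA,
          dif_pos ⟨hp, by simp only [List.length_append, List.length_cons, List.length_nil]; omega⟩]
        have hscan1 : pvScan1 (p ++ l ++ '-' :: (r ++ ',' :: (List.intercalate [','] rest ++ [t]))) p.length = p.length + l.length :=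
          pv_scan1_mid' _ p l (r ++ ',' :: (List.intercalate [','] rest ++ [t])) '-' _ _ rfl rfl rfl hlstops (by simp [pvStops])
        simp only [hscan1]
        rw [pv_getD' _ (p ++ l) (r ++ ',' :: (List.intercalate [','] rest ++ [t])) '-' ' ' _ (by simp) (by simp), if_pos rfl]
        have hscan2 : pvScan2 (p ++ l ++ '-' :: (r ++ ',' :: (List.intercalate [','] rest ++ [t]))) (p.length + l.length + 1) =
            some (p.length + l.length + 1 + r.length) :=
          pv_scan2_mid' _ (p ++ l ++ ['-']) r (List.intercalate [','] rest ++ [t]) ',' _ _ (by simp)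
            (by simp only [List.length_append, List.length_cons, List.length_nil] <;> omega)
            (by simp only [List.length_append, List.length_cons, List.length_nil] <;> omega)
            hrstops (by simp [pvStops])
        rw [dif_pos (by rw [hscan2]; rfl)]
        simp only [hscan2, Option.get_some]
        have hslice2 : (((p ++ l ++ '-' :: (r ++ ',' :: (List.intercalate [','] rest ++ [t]))).take (p.length + l.length + 1 + r.length)).drop (p.length + l.length + 1)) = r :=
          pv_slice_any _ (p ++ l ++ ['-']) r (',' :: (List.intercalate [','] rest ++ [t])) _ _ (by simp)
            (by simp only [List.length_append, List.length_cons, List.length_nil] <;> omega)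
            (by simp only [List.length_append, List.length_cons, List.length_nil] <;> omega)
        have hslice1 : (((p ++ l ++ '-' :: (r ++ ',' :: (List.intercalate [','] rest ++ [t]))).take (p.length + l.length)).drop p.length) = l :=
          pv_slice_any _ p l ('-' :: (r ++ ',' :: (List.intercalate [','] rest ++ [t]))) _ _ rfl rfl rfl
        simp only [hslice1, hslice2, hes, hss]
        rw [dif_pos ⟨rfl, rfl⟩]
        simp only [Option.get_some]
        have e3 : p ++ l ++ '-' :: (r ++ ',' :: (List.intercalate [','] rest ++ [t])) =
            (p ++ tok ++ [',']) ++ List.intercalate [','] rest ++ [t] := by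
          rw [hdec]; simp
        have e4 : p.length + l.length + 1 + r.length + 1 = (p ++ tok ++ [',']).length := by
          rw [hdec]; simp only [List.length_append, List.length_cons, List.length_nil]; omega
        rw [e3, e4, hIH (p ++ tok ++ [',']) _ (by simp only [List.length_append]; omega)]
        congr 1
        rw [pvExpandB, if_pos ((pv_isIn_singleton '-' tok).mpr hdash)]
        have hsp : tok.splitOn '-' = [l, r] := by
          conv_lhs => rw [hdec]
          exact pv_splitOn_pair '-' l r hlnm hrnm
        rw [hsp]
        simp only [hss, hes]
      · -- a plain token, more tokens follow
        have hstops : ∀ x ∈ tok, x ∉ pvStops := by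
          intro x hx
          simp only [pvStops, List.mem_cons, List.mem_singleton, not_or]
          exact ⟨fun e => hGc (e ▸ hx), fun e => hdash (e ▸ hx), fun e => hGp (e ▸ hx), by simp⟩
        have e1 : p ++ (tok ++ ',' :: List.intercalate [','] rest) ++ [t] =
            p ++ tok ++ ',' :: (List.intercalate [','] rest ++ [t]) := by simp
        rw [e1, pvLoopA,
          dif_pos ⟨hp, by simp only [List.length_append, List.length_cons, List.length_nil]; omega⟩]
        have hscan1 : pvScan1 (p ++ tok ++ ',' :: (List.intercalate [','] rest ++ [t])) p.length = p.length + tok.length :=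
          pv_scan1_mid' _ p tok (List.intercalate [','] rest ++ [t]) ',' _ _ rfl rfl rfl hstops (by simp [pvStops])
        simp only [hscan1]
        rw [pv_getD' _ (p ++ tok) (List.intercalate [','] rest ++ [t]) ',' ' ' _ (by simp) (by simp),
          if_neg (by decide : ¬(',' = '-'))]
        have hslice1 : (((p ++ tok ++ ',' :: (List.intercalate [','] rest ++ [t])).take (p.length + tok.length)).drop p.length) = tok :=
          pv_slice_any _ p tok (',' :: (List.intercalate [','] rest ++ [t])) _ _ rfl rfl rfl
        rw [hslice1]
        have e3 : p ++ tok ++ ',' :: (List.intercalate [','] rest ++ [t]) =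
            (p ++ tok ++ [',']) ++ List.intercalate [','] rest ++ [t] := by simp
        have e4 : p.length + tok.length + 1 = (p ++ tok ++ [',']).length := by
          simp only [List.length_append, List.length_cons, List.length_nil] <;> omega
        rw [e3, e4, hIH (p ++ tok ++ [',']) _ (by simp only [List.length_append]; omega)]
        congr 1
        rw [pvExpandB,
          if_neg (by simp only [Bool.not_eq_true]; exact Bool.eq_false_iff.mpr (fun h => hdash ((pv_isIn_singleton '-' tok).mp h)))]

theorem pv_sub_splitOn (c : Char) (xs tok : List Char) (h : tok ∈ xs.splitOn c) :
    ∀ x ∈ tok, x ∈ xs := by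
  induction xs generalizing tok with
  | nil =>
    simp only [List.splitOn_nil, List.mem_singleton] at h
    intro x hx
    rw [h] at hx
    cases hx
  | cons y xs ih =>
    simp only [List.splitOn, List.splitOnP_cons] at h ih
    by_cases hy : y = c
    · rw [if_pos (by simp [hy])] at h
      rcases List.mem_cons.mp h with h' | h'
      · intro x hx; rw [h'] at hx; cases hx
      · intro x hx; exact List.mem_cons_of_mem _ (ih tok h' x hx)
    · rw [if_neg (by simp [hy])] at h
      obtain ⟨hd, tl, heq⟩ := List.exists_cons_of_ne_nil (List.splitOnP_ne_nil (· == c) xs)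
      rw [heq, List.modifyHead_cons] at h
      rcases List.mem_cons.mp h with h' | h'
      · subst h'
        intro x hx
        rcases List.mem_cons.mp hx with h'' | h''
        · simp [h'']
        · exact List.mem_cons_of_mem _ (ih hd (by rw [heq]; exact List.mem_cons_self) x h'')
      · intro x hx
        exact List.mem_cons_of_mem _ (ih tok (by rw [heq]; exact List.mem_cons_of_mem _ h') x hx)

-- ===== VERDICT (by name: the statement is the Claim_ definition above) =====
theorem parseOperationExpression_spec : Claim_equal_parseOperationExpression := by
  intro expression _hdom hpre
  simp only [Pre_parseOperationExpression] at hpre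
  unfold Spec_parseOperationExpression parseOperationExpression parseOperationExpression_alt
  rw [pv_slice_1_neg1]
  obtain ⟨hP1, hP2, hP3, hP4, hP5⟩ := hpre
  set cs := expression.toList with hcsdef
  set inner := (cs.drop 1).dropLast with hinnerdef
  by_cases hinn : inner = []
  · rw [if_pos hinn]
    have hlen : cs.length ≤ 2 := by
      have h0 := congrArg List.length hinn
      simp only [hinnerdef, List.length_dropLast, List.length_drop, List.length_nil] at h0
      omega
    rw [pvLoopA, dif_neg (by omega)]
    simp
  · rw [if_neg hinn]
    have hcsne : cs ≠ [] := by
      intro h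
      exact hinn (by rw [hinnerdef, h]; rfl)
    obtain ⟨c0, rest0, hc0⟩ := List.exists_cons_of_ne_nil hcsne
    have hrest0ne : rest0 ≠ [] := by
      intro h
      exact hinn (by rw [hinnerdef, hc0, h]; rfl)
    set t := rest0.getLast hrest0ne with htdef
    have hrest0 : rest0 = inner ++ [t] := by
      conv_lhs => rw [← List.dropLast_append_getLast hrest0ne]
      rw [← htdef, hinnerdef, hc0]
      simp [List.drop_one]
    have hcs2 : cs = [c0] ++ List.intercalate [','] (inner.splitOn ',') ++ [t] := by
      rw [List.intercalate_splitOn, hc0, hrest0]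
      simp
    have hgetLast : cs.getLast? = some t := by
      rw [hc0, hrest0, show c0 :: (inner ++ [t]) = (c0 :: inner) ++ [t] by simp]
      exact List.getLast?_concat
    have hlastne : (inner.splitOn ',').getLastD [] ≠ [] :=
      pv_getLast_splitOn_ne_nil ',' inner hinn hP2
    have hgood : ∀ tok ∈ inner.splitOn ',', pvGoodTok tok := by
      intro tok htok
      exact ⟨pv_mem_splitOn_not_mem ',' inner tok htok,
        fun hx => hP1 (pv_sub_splitOn ',' inner tok htok ')' hx),
        hP3 tok htok⟩
    have ht1 : t = '-' → '-' ∈ (inner.splitOn ',').getLastD [] := by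
      intro he
      exact hP4 (by rw [hgetLast, he]) hinn
    have ht2 : '-' ∈ (inner.splitOn ',').getLastD [] → t ∈ pvStops := by
      intro hm
      obtain ⟨t', ht', hts⟩ := hP5 hm
      rw [hgetLast] at ht'
      cases ht'
      exact hts
    have hm := pv_main (inner.splitOn ',') [c0] t [] (by simp)
      (List.splitOnP_ne_nil _ inner) hgood hlastne ht1 ht2
    simp only [List.length_cons, List.length_nil] at hm
    rw [hcs2, hm]
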